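-- pv_equiv track=rewrite | github.com/Marty42780/NSI-1ere | Sujets_Bac_Epreuves_Pratique/sujets_pratique_2022.py | occurence_lettres
-- ===== SOURCE A (Python) =====
-- def occurence_lettres(phrase: str) -> dict:
--     result = {}
--     for el in phrase:
--         if el in result:
--             result[el] += 1
--         else:
--             result[el] = 1
--     return result
-- ===== SOURCE B (Python) =====
-- # B: collect the distinct characters in first-occurrence order, then count each
-- # with str.count — repeated full scans instead of one accumulating dict pass.
-- def occurence_lettres(phrase: str) -> dict:
--     uniques = []
--     for ch in phrase:
--         if ch not in uniques:
--             uniques.append(ch)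
--     return {ch: phrase.count(ch) for ch in uniques}
-- ===== Notes on version B (the rewrite author's own statement) =====
-- stated objective: alternative
-- what changed: B first builds the list of distinct characters in first-occurrence order, then computes each count with a separate full scan via str.count, instead of A's single pass that increments a dict entry per character.
import Mathlib
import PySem

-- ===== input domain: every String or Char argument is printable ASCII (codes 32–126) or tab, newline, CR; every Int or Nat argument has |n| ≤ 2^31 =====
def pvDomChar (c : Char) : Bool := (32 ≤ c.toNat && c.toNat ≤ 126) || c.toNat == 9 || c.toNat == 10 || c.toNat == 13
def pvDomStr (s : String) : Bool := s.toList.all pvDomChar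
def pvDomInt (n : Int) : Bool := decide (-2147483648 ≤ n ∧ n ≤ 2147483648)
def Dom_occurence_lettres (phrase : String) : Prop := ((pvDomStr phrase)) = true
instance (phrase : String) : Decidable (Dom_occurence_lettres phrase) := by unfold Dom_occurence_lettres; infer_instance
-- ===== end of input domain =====

-- B counts distinct characters with str.count scans instead of A's one accumulating dict pass; same result, alternative structure.

-- ===== PORT A =====
-- one pass: result[el] += 1 if el in result else result[el] = 1
def occurence_lettres (phrase : String) : List (String × Int) :=
  (phrase.toList.foldl
    (fun (d : PySem.Dict String Int) el =>
      let k := String.ofList [el]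
      if d.contains k then d.insert k (d.getD k 0 + 1) else d.insert k 1)
    PySem.Dict.empty).items

-- ===== PORT B =====
-- uniques = distinct chars in first-occurrence order (PySem.Set.ofList); then {ch: phrase.count(ch)}
def occurence_lettres_alt (phrase : String) : List (String × Int) :=
  (PySem.Set.ofList phrase.toList).map
    (fun c => (String.ofList [c], (PySem.Str.count phrase (String.ofList [c]) : Int)))

-- ===== PRECONDITION & SPEC =====
def Spec_occurence_lettres (phrase : String) (out : List (String × Int)) : Prop := out = occurence_lettres_alt phrase
instance (phrase : String) (out : List (String × Int)) : Decidable (Spec_occurence_lettres phrase out) := by unfold Spec_occurence_lettres; infer_instance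

-- ===== CLAIM (what is proved, stated in full; the proofs are below) =====
def Claim_equal_occurence_lettres : Prop := ∀ (phrase : String), Dom_occurence_lettres phrase → Spec_occurence_lettres phrase (occurence_lettres phrase)

-- ===== LEMMAS AND PROOFS =====

theorem sKey_injective : Function.Injective (fun c : Char => String.ofList [c]) := by
  intro a b h
  have := congrArg String.toList h
  simpa using this

-- str.count with a single-character needle is List.count (unfolds Chars.count.go)
theorem count_go_single (c : Char) : ∀ (fuel : Nat) (l : List Char) (acc : Nat), l.length ≤ fuel →
    PySem.Chars.count.go [c] fuel l acc = acc + l.count c := by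
  intro fuel
  induction fuel with
  | zero =>
    intro l acc h
    have : l = [] := List.eq_nil_of_length_eq_zero (Nat.le_zero.mp h)
    subst this; simp [PySem.Chars.count.go]
  | succ n ih =>
    intro l acc h
    cases l with
    | nil => simp [PySem.Chars.count.go]
    | cons x t =>
      simp only [PySem.Chars.count.go, List.isPrefixOf, Bool.and_true,
        List.drop_succ_cons, List.length_cons] at *
      by_cases hx : c = x
      · subst hx
        simp only [beq_self_eq_true, if_pos, List.length_nil, List.drop_zero]
        rw [ih t (acc + 1) (by omega)]
        simp
        omega
      · rw [if_neg (by simpa using hx)]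
        rw [ih t acc (by omega)]
        simp [Ne.symm hx]

theorem str_count_single (s : String) (c : Char) :
    PySem.Str.count s (String.ofList [c]) = s.toList.count c := by
  have h := count_go_single c s.toList.length s.toList 0 (le_refl _)
  rw [PySem.Str.count_eq]
  have ht : (String.ofList [c]).toList = [c] := by simp
  rw [ht]
  unfold PySem.Chars.count
  rw [if_neg (by simp), h, Nat.zero_add]

-- Set.ofList commutes with mapping an injective key over the list
theorem set_ofList_map_aux (f : Char → String) (hf : Function.Injective f) :
    ∀ (l : List Char) (s : List Char),
      (l.map f).foldl PySem.Set.add (s.map f) = (l.foldl PySem.Set.add s).map f := by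
  intro l
  induction l with
  | nil => intro s; rfl
  | cons x t ih =>
    intro s
    have hadd : PySem.Set.add (s.map f) (f x) = (PySem.Set.add s x).map f := by
      have hiff : f x ∈ s.map f ↔ x ∈ s := List.mem_map_of_injective hf
      simp only [PySem.Set.add, PySem.Set.contains, List.contains_eq_mem, decide_eq_true_eq]
      by_cases hx : x ∈ s
      · rw [if_pos (hiff.mpr hx), if_pos hx]
      · rw [if_neg (fun hh => hx (hiff.mp hh)), if_neg hx, List.map_append, List.map_singleton]
    simp only [List.map_cons, List.foldl_cons, hadd]
    exact ih (PySem.Set.add s x)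

theorem set_ofList_map (f : Char → String) (hf : Function.Injective f) (l : List Char) :
    PySem.Set.ofList (l.map f) = (PySem.Set.ofList l).map f := by
  have := set_ofList_map_aux f hf l []
  simpa [PySem.Set.ofList_eq_foldl] using this

-- A's branched update is exactly the counter update
theorem a_step_eq (d : PySem.Dict String Int) (k : String) :
    (if d.contains k then d.insert k (d.getD k 0 + 1) else d.insert k 1)
      = d.insert k (d.getD k 0 + 1) := by
  by_cases h : d.contains k = true
  · simp [h]
  · have hd : d.getD k 0 = 0 :=
      PySem.Dict.getD_of_not_contains d 0 (eq_false_of_ne_true h)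
    simp [eq_false_of_ne_true h, hd]

-- ===== VERDICT (by name: the statement is the Claim_ definition above) =====
theorem occurence_lettres_spec : Claim_equal_occurence_lettres := by
  intro phrase _
  unfold Spec_occurence_lettres occurence_lettres occurence_lettres_alt
  set S := fun c : Char => String.ofList [c] with hS
  set L := phrase.toList with hL
  have h1 : L.foldl
      (fun (d : PySem.Dict String Int) el =>
        let k := S el
        if d.contains k then d.insert k (d.getD k 0 + 1) else d.insert k 1)
      PySem.Dict.empty
      = (L.map S).foldl (fun d x => d.insert x (d.getD x 0 + 1)) PySem.Dict.empty := by
    rw [List.foldl_map]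
    congr 1
    funext d x
    exact a_step_eq d (S x)
  rw [h1, PySem.Dict.foldl_insert_getD_add_one_eq_counter, PySem.Dict.items_counter,
    set_ofList_map S sKey_injective, List.map_map]
  apply List.map_congr_left
  intro c _
  simp only [Function.comp]
  rw [List.count_map_of_injective L S sKey_injective c, str_count_single phrase c, hL]
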